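-- pv_equiv track=rewrite | github.com/b-pardi/VibeCodeReporter | utils/code_metrics.py | _compute_max_nesting_indent
-- ===== SOURCE A (Python) =====
-- def _compute_max_nesting_indent(content: str) -> int:
--     """Compute max nesting by indentation (for Python)."""
--     lines = content.split('\n')
--     max_indent = 0
--
--     for line in lines:
--         if not line.strip():
--             continue
--
--         # Count leading spaces/tabs
--         indent = 0
--         for char in line:
--             if char == ' ':
--                 indent += 1
--             elif char == '\t':
--                 indent += 4  # Treat tab as 4 spaces
--             else:
--                 break
--
--         # Convert to nesting level (assume 4-space indent)
--         nesting = indent // 4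
--         max_indent = max(max_indent, nesting)
--
--     return max_indent
-- ===== SOURCE B (Python) =====
-- def _compute_max_nesting_indent(content: str) -> int:
--     """Compute max nesting by indentation (for Python).
--
--     Single left-to-right scan over the characters (no split into lines):
--     a state machine tracks the current line's weighted leading indent,
--     whether we are still in the leading whitespace run, and whether the
--     line has any non-whitespace character; the max is folded in whenever
--     a line ends (at '\n' or at end of input)."""
--     best = 0
--     indent = 0
--     leading = True
--     nonblank = False
--     for c in content:
--         if c == '\n':
--             if nonblank:
--                 best = max(best, indent // 4)
--             indent = 0
--             leading = True
--             nonblank = False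
--         else:
--             if leading:
--                 if c == ' ':
--                     indent += 1
--                 elif c == '\t':
--                     indent += 4
--                 else:
--                     leading = False
--             if not c.isspace():
--                 nonblank = True
--     if nonblank:
--         best = max(best, indent // 4)
--     return best
-- ===== Notes on version B (the rewrite author's own statement) =====
-- stated objective: alternative
-- what changed: Replaces A's split-into-lines with a nested per-line character loop by a single character-level state machine over the whole string: no split, one pass, state (best, indent, leading, nonblank) updated per character and flushed at each newline and at end of input.
import Mathlib
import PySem

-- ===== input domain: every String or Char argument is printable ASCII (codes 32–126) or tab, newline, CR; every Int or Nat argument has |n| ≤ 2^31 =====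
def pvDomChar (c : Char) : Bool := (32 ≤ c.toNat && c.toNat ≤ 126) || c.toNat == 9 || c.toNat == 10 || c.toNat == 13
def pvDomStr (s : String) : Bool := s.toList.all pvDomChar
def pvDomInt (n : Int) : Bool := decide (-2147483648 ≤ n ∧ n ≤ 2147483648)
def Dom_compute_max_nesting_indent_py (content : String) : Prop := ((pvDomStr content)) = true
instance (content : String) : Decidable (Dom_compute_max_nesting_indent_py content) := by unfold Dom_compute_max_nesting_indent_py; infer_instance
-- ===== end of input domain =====

-- B replaces A's split-into-lines plus nested per-line character loop by a single
-- character-level state machine over the whole string (flushing the running max at each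
-- newline and at end of input); objective: alternative (same O(n) cost, no split pass).

-- ===== PORT A =====
-- inner 'for char in line: … else break' loop, accumulating indent
def pvIndentLoop (acc : Int) : List Char → Int
  | [] => acc
  | c :: rest =>
    if c = ' ' then pvIndentLoop (acc + 1) rest
    else if c = '\t' then pvIndentLoop (acc + 4) rest
    else acc

def compute_max_nesting_indent_py (content : String) : Int :=
  let lines := PySem.Chars.splitOn content.toList ['\n']
  lines.foldl (fun max_indent line =>
    if (PySem.Chars.strip line).isEmpty then max_indent   -- 'if not line.strip(): continue'
    else
      let indent := pvIndentLoop 0 line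
      let nesting := PySem.Int.floordiv indent 4
      max max_indent nesting) 0

-- ===== PORT B =====
-- one step of B's state machine: state (best, indent, leading, nonblank), next char c
def pvMStep (s : Int × Int × Bool × Bool) (c : Char) : Int × Int × Bool × Bool :=
  match s with
  | (best, indent, leading, nonblank) =>
    if c = '\n' then
      ((if nonblank then max best (PySem.Int.floordiv indent 4) else best), 0, true, false)
    else
      let (indent, leading) :=
        if leading then
          if c = ' ' then (indent + 1, leading)
          else if c = '\t' then (indent + 4, leading)
          else (indent, false)
        else (indent, leading)
      let nonblank := if !PySem.Chars.isspace c then true else nonblank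
      (best, indent, leading, nonblank)

def compute_max_nesting_indent_py_alt (content : String) : Int :=
  let s := content.toList.foldl pvMStep (0, 0, true, false)
  -- final flush: 'if nonblank: best = max(best, indent // 4)'
  if s.2.2.2 then max s.1 (PySem.Int.floordiv s.2.1 4) else s.1

-- ===== PRECONDITION & SPEC =====
def Spec_compute_max_nesting_indent_py (content : String) (out : Int) : Prop := out = compute_max_nesting_indent_py_alt content
instance (content : String) (out : Int) : Decidable (Spec_compute_max_nesting_indent_py content out) := by unfold Spec_compute_max_nesting_indent_py; infer_instance

-- ===== CLAIM (what is proved, stated in full; the proofs are below) =====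
def Claim_equal_compute_max_nesting_indent_py : Prop := ∀ (content : String), Dom_compute_max_nesting_indent_py content → Spec_compute_max_nesting_indent_py content (compute_max_nesting_indent_py content)

-- ===== LEMMAS AND PROOFS =====

-- proof-side vocabulary
def pvSt (c : Char) : Bool := c == ' ' || c == '\t'
def pvWsum (l : List Char) : Int := (l.map (fun c => if c == '\t' then (4 : Int) else 1)).sum
def pvNB (l : List Char) : Bool := l.any (fun c => !PySem.Chars.isspace c)

-- flush at end of a line: state held mid-line, 'line' the rest of the line
def pvClose (b i : Int) (lead nb : Bool) (line : List Char) : Int :=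
  if nb || pvNB line then
    max b (PySem.Int.floordiv (if lead then i + pvWsum (line.takeWhile pvSt) else i) 4)
  else b

def pvF (lines : List (List Char)) (b : Int) : Int :=
  lines.foldl (fun b line => pvClose b 0 true false line) b

-- structural split at '\n'
def pvSplit : List Char → List (List Char)
  | [] => [[]]
  | c :: rest =>
    if c = '\n' then [] :: pvSplit rest
    else
      match pvSplit rest with
      | [] => [[c]]
      | h :: t => (c :: h) :: t

def pvConsHead (p : List Char) : List (List Char) → List (List Char)
  | [] => [p]
  | h :: t => (p ++ h) :: t

def pvG (b i : Int) (lead nb : Bool) : List (List Char) → Int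
  | [] => b
  | first :: rest => pvF rest (pvClose b i lead nb first)

theorem pvSplit_ne_nil (cs : List Char) : pvSplit cs ≠ [] := by
  cases cs with
  | nil => simp [pvSplit]
  | cons c rest =>
    simp only [pvSplit]
    split
    · simp
    · cases h : pvSplit rest <;> simp

theorem pv_go_spec (fuel : Nat) : ∀ (l cur : List Char) (acc : List (List Char)),
    l.length < fuel →
    PySem.Chars.splitOn.go ['\n'] fuel l cur acc = acc.reverse ++ pvConsHead cur.reverse (pvSplit l) := by
  induction fuel with
  | zero => intro l cur acc h; omega
  | succ fuel ih =>
    intro l cur acc h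
    cases l with
    | nil => simp [PySem.Chars.splitOn.go, pvSplit, pvConsHead]
    | cons c rest =>
      by_cases hc : c = '\n'
      · subst hc
        have hpre : List.isPrefixOf ['\n'] ('\n' :: rest) = true := by
          simp [List.isPrefixOf]
        rw [PySem.Chars.splitOn.go]
        simp only [hpre, if_true, List.length_singleton, List.drop_one, List.tail_cons]
        rw [ih rest [] (cur.reverse :: acc) (by simpa using Nat.lt_of_succ_lt_succ h)]
        have : pvSplit ('\n' :: rest) = [] :: pvSplit rest := by simp [pvSplit]
        rw [this]
        cases hs : pvSplit rest with
        | nil => exact absurd hs (pvSplit_ne_nil rest)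
        | cons h' t => simp [pvConsHead]
      · have hpre : List.isPrefixOf ['\n'] (c :: rest) = false := by
          simp [List.isPrefixOf]
          exact fun hh => absurd hh.symm hc
        rw [PySem.Chars.splitOn.go]
        simp only [hpre, Bool.false_eq_true, if_false]
        rw [ih rest (c :: cur) acc (Nat.lt_of_succ_lt_succ h)]
        have : pvSplit (c :: rest) = match pvSplit rest with
          | [] => [[c]]
          | h :: t => (c :: h) :: t := by simp [pvSplit, hc]
        rw [this]
        cases hs : pvSplit rest with
        | nil => exact absurd hs (pvSplit_ne_nil rest)
        | cons h' t => simp [pvConsHead]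

theorem pv_splitOn_eq (cs : List Char) : PySem.Chars.splitOn cs ['\n'] = pvSplit cs := by
  unfold PySem.Chars.splitOn
  rw [pv_go_spec (cs.length + 1) cs [] [] (by omega)]
  cases hs : pvSplit cs with
  | nil => exact absurd hs (pvSplit_ne_nil cs)
  | cons h t => simp [pvConsHead]

-- 'not line.strip()' is 'no non-whitespace char'
theorem pv_strip_isEmpty (l : List Char) : (PySem.Chars.strip l).isEmpty = !pvNB l := by
  unfold PySem.Chars.strip PySem.Chars.rstrip PySem.Chars.lstrip pvNB
  by_cases h : l.any (fun c => !PySem.Chars.isspace c) = true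
  · simp only [h, Bool.not_true]
    rw [Bool.eq_false_iff]
    intro hcon
    rw [List.isEmpty_iff] at hcon
    have : (l.dropWhile PySem.Chars.isspace).reverse.any (fun c => !PySem.Chars.isspace c) = true := by
      simp only [List.any_reverse]
      rcases List.any_eq_true.mp h with ⟨x, hx, hnx⟩
      have hx' : x ∈ l.dropWhile PySem.Chars.isspace := by
        have hmem : x ∈ l.takeWhile PySem.Chars.isspace ++ l.dropWhile PySem.Chars.isspace := by
          rw [List.takeWhile_append_dropWhile]; exact hx
        rcases List.mem_append.mp hmem with h1 | h2
        · exact absurd (List.mem_takeWhile_imp h1) (by simpa using hnx)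
        · exact h2
      exact List.any_eq_true.mpr ⟨x, hx', hnx⟩
    rcases List.any_eq_true.mp this with ⟨x, hx, hnx⟩
    have := List.dropWhile_eq_nil_iff.mp (List.reverse_eq_nil_iff.mp hcon) x hx
    simp [this] at hnx
  · have hall : ∀ x ∈ l, PySem.Chars.isspace x = true := by
      intro x hx
      by_contra hns
      exact h (List.any_eq_true.mpr ⟨x, hx, by simpa using hns⟩)
    have h1 : l.dropWhile PySem.Chars.isspace = [] :=
      List.dropWhile_eq_nil_iff.mpr fun x hx => hall x hx
    simp only [h1, List.reverse_nil, List.dropWhile_nil, List.isEmpty_nil, Bool.not_eq_true] at h ⊢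
    simp [h]

-- A's inner char loop is acc + the weighted sum over the leading run
theorem pvIndentLoop_eq (line : List Char) : ∀ acc : Int,
    pvIndentLoop acc line = acc + pvWsum (line.takeWhile pvSt) := by
  induction line with
  | nil => intro acc; simp [pvIndentLoop, pvWsum]
  | cons c rest ih =>
    intro acc
    by_cases hs : c = ' '
    · subst hs; simp [pvIndentLoop, pvSt, pvWsum, ih]; ring
    · by_cases ht : c = '\t'
      · subst ht; simp [pvIndentLoop, pvSt, pvWsum, ih]; ring
      · have h1 : (c == ' ') = false := by simp [hs]
        have h2 : (c == '\t') = false := by simp [ht]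
        simp [pvIndentLoop, hs, ht, pvSt, h1, h2, pvWsum]

-- A's per-line step is pvClose from a fresh line state
theorem pv_stepA_eq (b : Int) (line : List Char) :
    (if (PySem.Chars.strip line).isEmpty then b
     else max b (PySem.Int.floordiv (pvIndentLoop 0 line) 4))
      = pvClose b 0 true false line := by
  rw [pv_strip_isEmpty, pvIndentLoop_eq]
  unfold pvClose
  by_cases h : pvNB line = true <;> simp [h]

-- within-line machine step preserves pvClose
theorem pv_close_step (b i : Int) (lead nb : Bool) (c : Char) (h : List Char)
    (hc : ¬ c = '\n') :
    pvClose b i lead nb (c :: h)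
      = match pvMStep (b, i, lead, nb) c with
        | (b', i', lead', nb') => pvClose b' i' lead' nb' h := by
  unfold pvMStep
  simp only [hc, if_false]
  have hnb : (nb || pvNB (c :: h)) = ((if !PySem.Chars.isspace c then true else nb) || pvNB h) := by
    unfold pvNB
    cases hsp : PySem.Chars.isspace c <;> cases nb <;> simp [hsp]
  by_cases hl : lead
  · subst hl
    by_cases hsp : c = ' '
    · subst hsp
      unfold pvClose
      rw [hnb]
      simp [pvSt, pvWsum]
      split <;> [skip; rfl]
      congr 2
      ring
    · by_cases hst : c = '\t'
      · subst hst
        unfold pvClose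
        rw [hnb]
        simp [pvSt, pvWsum]
        split <;> [skip; rfl]
        congr 2
        ring
      · have h1 : (c == ' ') = false := by simp [hsp]
        have h2 : (c == '\t') = false := by simp [hst]
        unfold pvClose
        rw [hnb]
        simp [pvSt, h1, h2, hsp, hst, pvWsum]
  · have hl' : lead = false := by simpa using hl
    subst hl'
    unfold pvClose
    rw [hnb]
    simp

-- the machine run plus final flush equals the per-line fold, from any mid-line state
theorem pv_machine_eq (cs : List Char) : ∀ (b i : Int) (lead nb : Bool),
    (let s := cs.foldl pvMStep (b, i, lead, nb)
     if s.2.2.2 then max s.1 (PySem.Int.floordiv s.2.1 4) else s.1)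
      = pvG b i lead nb (pvSplit cs) := by
  induction cs with
  | nil =>
    intro b i lead nb
    simp only [List.foldl_nil, pvSplit, pvG, pvF, List.foldl_nil]
    unfold pvClose
    simp [pvNB, pvWsum]
  | cons c rest ih =>
    intro b i lead nb
    by_cases hc : c = '\n'
    · subst hc
      have hstep : pvMStep (b, i, lead, nb) '\n'
          = ((if nb then max b (PySem.Int.floordiv i 4) else b), 0, true, false) := by
        simp [pvMStep]
      simp only [List.foldl_cons, hstep, ih]
      have hsplit : pvSplit ('\n' :: rest) = [] :: pvSplit rest := by simp [pvSplit]
      rw [hsplit]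
      have hclose : pvClose b i lead nb [] = (if nb then max b (PySem.Int.floordiv i 4) else b) := by
        unfold pvClose
        simp [pvNB, pvWsum]
      cases hs : pvSplit rest with
      | nil => exact absurd hs (pvSplit_ne_nil rest)
      | cons h t =>
        simp only [pvG, pvF, List.foldl_cons, hclose]
    · simp only [List.foldl_cons, ih]
      have hsplit : pvSplit (c :: rest) = match pvSplit rest with
        | [] => [[c]]
        | h :: t => (c :: h) :: t := by simp [pvSplit, hc]
      rw [hsplit]
      cases hs : pvSplit rest with
      | nil => exact absurd hs (pvSplit_ne_nil rest)
      | cons h t =>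
        have := pv_close_step b i lead nb c h hc
        cases hm : pvMStep (b, i, lead, nb) c with
        | mk b' s' =>
          cases s' with
          | mk i' s'' =>
            cases s'' with
            | mk lead' nb' =>
              rw [hm] at this
              simp only [pvG]
              rw [this]

-- ===== VERDICT (by name: the statement is the Claim_ definition above) =====
theorem compute_max_nesting_indent_py_spec : Claim_equal_compute_max_nesting_indent_py := by
  intro content _
  unfold Spec_compute_max_nesting_indent_py
  dsimp only [compute_max_nesting_indent_py, compute_max_nesting_indent_py_alt]
  rw [pv_machine_eq content.toList 0 0 true false, pv_splitOn_eq]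
  have hstep : (fun (max_indent : Int) (line : List Char) =>
      if (PySem.Chars.strip line).isEmpty then max_indent
      else max max_indent (PySem.Int.floordiv (pvIndentLoop 0 line) 4))
      = fun b line => pvClose b 0 true false line := by
    funext b line
    exact pv_stepA_eq b line
  rw [hstep]
  cases hs : pvSplit content.toList with
  | nil => exact absurd hs (pvSplit_ne_nil content.toList)
  | cons h t => simp only [pvG, pvF, List.foldl_cons]
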